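-- pv_equiv track=rewrite | github.com/XiaoSX/leetcode | titles_150/q1576.py | is_plex
-- ===== SOURCE A (Python) =====
-- def is_plex(s):
--     if len(s) == 1:
--         return False
--
--     if s[-1] == s[-2]:
--         return True
--
--     n = len(s)
--     for i in range(1, n // 2 + 1):
--         if s[-i:] == s[-2 * i:-i]:
--             return True
--     return False
-- ===== SOURCE B (Python) =====
-- def is_plex(s):
--     # Z-array of the reversed string: a square block ending at the last char of s
--     # is a prefix-square of r = s[::-1], i.e. some i >= 1 with z[i] >= i.
--     r = s[::-1]
--     n = len(r)
--     z = [0] * n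
--     for i in range(1, n):
--         k = 0
--         while i + k < n and r[k] == r[i + k]:
--             k += 1
--         z[i] = k
--     return any(z[i] >= i for i in range(1, n // 2 + 1))
-- ===== Notes on version B (the rewrite author's own statement) =====
-- stated objective: alternative
-- what changed: B reverses the string and builds a Z-array (longest common prefix of r with each of its suffixes) once, then reads the answer off as any z[i] >= i, instead of A's repeated block-slice comparisons with early return.
import Mathlib
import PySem

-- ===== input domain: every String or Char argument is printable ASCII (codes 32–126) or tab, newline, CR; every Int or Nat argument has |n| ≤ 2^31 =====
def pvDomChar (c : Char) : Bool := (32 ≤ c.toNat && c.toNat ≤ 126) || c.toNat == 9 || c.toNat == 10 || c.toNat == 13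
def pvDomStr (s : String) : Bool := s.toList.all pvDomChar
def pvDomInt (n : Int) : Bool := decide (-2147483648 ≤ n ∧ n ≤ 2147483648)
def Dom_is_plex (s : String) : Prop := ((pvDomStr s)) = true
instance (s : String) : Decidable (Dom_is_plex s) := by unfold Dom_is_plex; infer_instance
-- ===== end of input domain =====

-- B replaces A's repeated suffix-slice comparisons by a Z-array of the reversed string (objective: alternative algorithm, same worst-case cost).

-- ===== PORT A =====
-- literal transliteration over s.toList (PySem.Chars level, exact here); the early-return loop is List.any over range(1, n//2+1)
def is_plex (s : String) : Bool :=
  let cs := s.toList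
  if cs.length == 1 then false
  else
    match PySem.List.pyGet? cs (-1), PySem.List.pyGet? cs (-2) with
    | some c1, some c2 =>
        if c1 == c2 then true
        else
          let n : Int := cs.length
          (PySem.List.pyRange 1 (PySem.Int.floordiv n 2 + 1) 1).any (fun i =>
            PySem.List.slice cs (some (-i)) none == PySem.List.slice cs (some (-(2*i))) (some (-i)))
    | _, _ => false  -- s[-1] raises IndexError on the empty string: outside Pre_

-- ===== PORT B =====
-- the inner while loop of Source B: counts k with r[k] == r[i+k]
def zRun (r : List Char) (i k : Nat) : Nat :=
  if i + k < r.length then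
    if r.getD k ' ' == r.getD (i + k) ' ' then zRun r i (k + 1) else k
  else k
termination_by r.length - (i + k)

def is_plex_alt (s : String) : Bool :=
  let r := s.toList.reverse            -- r = s[::-1]
  let n := r.length
  -- z = [0]*n; for i in range(1, n): z[i] = k  (entry 0 stays 0)
  let z : List Int := (List.range n).map (fun i => if i = 0 then (0 : Int) else (zRun r i 0 : Int))
  (PySem.List.pyRange 1 (PySem.Int.floordiv (n : Int) 2 + 1) 1).any (fun i =>
    decide (i ≤ PySem.List.pyGetD z i 0))

-- ===== PRECONDITION & SPEC =====
-- Pre_ excludes only the empty string, on which A raises IndexError (s[-1]).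
def Pre_is_plex (s : String) : Prop := s ≠ ""
instance (s : String) : Decidable (Pre_is_plex s) := by unfold Pre_is_plex; infer_instance
def pvWitness_is_plex : String := "abab"

def Spec_is_plex (s : String) (out : Bool) : Prop := out = is_plex_alt s
instance (s : String) (out : Bool) : Decidable (Spec_is_plex s out) := by unfold Spec_is_plex; infer_instance

-- ===== CLAIM (what is proved, stated in full; the proofs are below) =====
def Claim_equal_is_plex : Prop := ∀ (s : String), Dom_is_plex s → Pre_is_plex s → Spec_is_plex s (is_plex s)

-- ===== LEMMAS AND PROOFS =====

-- length of the longest common prefix of two lists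
def lcpLen : List Char → List Char → Nat
  | a :: as, b :: bs => if a == b then lcpLen as bs + 1 else 0
  | _, _ => 0

theorem zRun_eq_lcp (r : List Char) (i k : Nat) (hi : 0 < i) :
    zRun r i k = k + lcpLen (r.drop k) (r.drop (i + k)) := by
  fun_induction zRun r i k with
  | case1 k h hb ih =>
      have hk : k < r.length := by omega
      have h1 : r.drop k = r[k] :: r.drop (k+1) := (List.getElem_cons_drop hk).symm
      have h2 : r.drop (i+k) = r[i+k] :: r.drop (i+k+1) := (List.getElem_cons_drop h).symm
      rw [h1, h2]
      have hg1 : r.getD k ' ' = r[k] := List.getD_eq_getElem r ' ' hk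
      have hg2 : r.getD (i+k) ' ' = r[i+k] := List.getD_eq_getElem r ' ' h
      rw [hg1, hg2] at hb
      have he : i + (k+1) = i + k + 1 := by omega
      rw [he] at ih
      simp only [lcpLen, hb, if_pos, ih]
      omega
  | case2 k h hb =>
      have hk : k < r.length := by omega
      have h1 : r.drop k = r[k] :: r.drop (k+1) := (List.getElem_cons_drop hk).symm
      have h2 : r.drop (i+k) = r[i+k] :: r.drop (i+k+1) := (List.getElem_cons_drop h).symm
      have hg1 : r.getD k ' ' = r[k] := List.getD_eq_getElem r ' ' hk
      have hg2 : r.getD (i+k) ' ' = r[i+k] := List.getD_eq_getElem r ' ' h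
      rw [hg1, hg2] at hb
      have hb' : (r[k] == r[i+k]) = false := by simpa using hb
      rw [h1, h2]
      simp [lcpLen, hb']
  | case3 k h =>
      have hd : r.drop (i+k) = [] := List.drop_eq_nil_of_le (by omega)
      rw [hd]
      cases r.drop k <;> simp [lcpLen]

theorem zRun_ge (r : List Char) (i k : Nat) : k ≤ zRun r i k := by
  fun_induction zRun r i k <;> omega

theorem lcpLen_ge_iff (a b : List Char) (m : Nat) :
    m ≤ lcpLen a b ↔ m ≤ a.length ∧ m ≤ b.length ∧ a.take m = b.take m := by
  induction a generalizing b m with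
  | nil => cases m <;> simp [lcpLen]
  | cons x as ih =>
    cases b with
    | nil => cases m <;> simp [lcpLen]
    | cons y bs =>
      cases m with
      | zero => simp
      | succ m =>
        by_cases hxy : x = y
        · simpa [lcpLen, hxy] using ih bs m
        · simp [lcpLen, hxy, beq_iff_eq]

-- Python's xs[-a:-b] for 0 < b ≤ a, as drop/take
theorem slice_neg_neg (cs : List Char) (a b : Nat) (hb : 0 < b) (hba : b ≤ a) :
    PySem.List.slice cs (some (-(a:Int))) (some (-(b:Int)))
      = (cs.drop (cs.length - a)).take ((cs.length - b) - (cs.length - a)) := by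
  simp [PySem.List.slice, PySem.List.clampIdx_neg_natCast, hb, Nat.lt_of_lt_of_le hb hba]

-- pointwise agreement of the two loop bodies, at list level
theorem body_eq (cs : List Char) (j : Nat) (h1 : 1 ≤ j) (h2 : j ≤ cs.length / 2) :
    (PySem.List.slice cs (some (-(j:Int))) none == PySem.List.slice cs (some (-(2*(j:Int)))) (some (-(j:Int))))
      = decide ((j:Int) ≤ (zRun cs.reverse j 0 : Int)) := by
  have h2j : 2 * j ≤ cs.length := by omega
  have e1 : PySem.List.slice cs (some (-(j:Int))) none = cs.drop (cs.length - j) :=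
    PySem.List.slice_from_neg_natCast cs j h1
  have e2 : -(2*(j:Int)) = -(((2*j : Nat) : Int)) := by push_cast; ring
  have e3 := slice_neg_neg cs (2*j) j h1 (by omega)
  have hz : zRun cs.reverse j 0 = lcpLen cs.reverse (cs.reverse.drop j) := by
    simpa using zRun_eq_lcp cs.reverse j 0 h1
  have t1 : cs.reverse.take j = (cs.drop (cs.length - j)).reverse := List.take_reverse
  have hq : (cs.take (cs.length - j)).length - j = cs.length - 2*j := by
    simp
    omega
  have t2 : (cs.reverse.drop j).take j
      = ((cs.drop (cs.length - 2*j)).take ((cs.length - j) - (cs.length - 2*j))).reverse := by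
    calc (cs.reverse.drop j).take j
        = ((cs.take (cs.length - j)).reverse).take j := by rw [List.drop_reverse]
      _ = ((cs.take (cs.length - j)).drop ((cs.take (cs.length - j)).length - j)).reverse := by
            rw [List.take_reverse]
      _ = ((cs.take (cs.length - j)).drop (cs.length - 2*j)).reverse := by rw [hq]
      _ = ((cs.drop (cs.length - 2*j)).take ((cs.length - j) - (cs.length - 2*j))).reverse := by
            rw [List.drop_take]
  rw [e2, e1, e3, Bool.eq_iff_iff]
  simp only [beq_iff_eq, decide_eq_true_eq, Nat.cast_le, hz]
  rw [lcpLen_ge_iff]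
  constructor
  · intro heq
    refine ⟨by simp; omega, by simp; omega, ?_⟩
    rw [t1, t2, List.reverse_inj]
    exact heq
  · rintro ⟨-, -, htake⟩
    rw [t1, t2, List.reverse_inj] at htake
    exact htake

theorem floordiv_natCast_two (n : Nat) :
    PySem.Int.floordiv (n : Int) 2 = ((n / 2 : Nat) : Int) := by
  unfold PySem.Int.floordiv
  rw [Int.fdiv_eq_ediv]
  · exact (Int.natCast_div n 2).symm

theorem toList_ne_nil (s : String) (h : s ≠ "") : s.toList ≠ [] := by
  intro hn
  apply h
  have := congrArg String.ofList hn
  simpa using this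

-- ===== VERDICT (by name: the statement is the Claim_ definition above) =====
theorem is_plex_spec : Claim_equal_is_plex := by
  intro s _ hpre
  unfold Spec_is_plex
  have hcs : s.toList ≠ [] := toList_ne_nil s hpre
  set cs := s.toList with hdef
  have hn1 : 0 < cs.length := List.length_pos_of_ne_nil hcs
  unfold is_plex is_plex_alt
  rw [← hdef]
  simp only [List.length_reverse]
  by_cases h1 : cs.length = 1
  · have hif : (cs.length == 1) = true := by simpa using h1
    rw [hif]
    simp only [if_true]
    rw [h1, floordiv_natCast_two]
    norm_num
  · -- n ≥ 2
    have hn2 : 2 ≤ cs.length := by omega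
    have hif : (cs.length == 1) = false := by simpa using h1
    rw [hif]
    simp only [Bool.false_eq_true, if_false]
    have hA1 : PySem.List.pyGet? cs (-1) = some cs[cs.length - 1] := by
      rw [PySem.List.pyGet?_neg_ofNat cs 1 (by omega) (by omega)]
      rw [List.getElem?_eq_getElem (by omega)]
    have hA2 : PySem.List.pyGet? cs (-2) = some cs[cs.length - 2] := by
      rw [PySem.List.pyGet?_neg_ofNat cs 2 (by omega) (by omega)]
      rw [List.getElem?_eq_getElem (by omega)]
    rw [hA1, hA2]
    dsimp only
    have hget : ∀ j : Nat, 1 ≤ j → j < cs.length →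
        PySem.List.pyGetD ((List.range cs.length).map
            (fun i => if i = 0 then (0:Int) else (zRun cs.reverse i 0 : Int))) ((j : Nat) : Int) 0
          = (zRun cs.reverse j 0 : Int) := by
      intro j hj1 hjn
      rw [PySem.List.pyGetD_natCast]
      rw [List.getD_eq_getElem _ _ (by simpa using hjn)]
      simp only [List.getElem_map, List.getElem_range]
      rw [if_neg (by omega)]
    -- the two anys range over the same list; rewrite B's body into A's via body_eq
    have hcongr : ∀ i ∈ PySem.List.pyRange 1 (PySem.Int.floordiv (cs.length : Int) 2 + 1) 1,
        (PySem.List.slice cs (some (-i)) none == PySem.List.slice cs (some (-(2*i))) (some (-i)))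
          = decide (i ≤ PySem.List.pyGetD ((List.range cs.length).map
              (fun i => if i = 0 then (0:Int) else (zRun cs.reverse i 0 : Int))) i 0) := by
      intro i hi
      rw [floordiv_natCast_two] at hi
      rw [PySem.List.mem_pyRange_one] at hi
      obtain ⟨hi1, hi2⟩ := hi
      have hj : i = ((i.toNat : Nat) : Int) := by omega
      set j := i.toNat with hjdef
      have hj1 : 1 ≤ j := by omega
      have hj2 : j ≤ cs.length / 2 := by omega
      have hjn : j < cs.length := by omega
      rw [hj, hget j hj1 hjn]
      have hcast : -(2 * ((j:Nat):Int)) = -(2*(j:Int)) := by ring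
      rw [hcast]
      exact body_eq cs j hj1 hj2
    have hany : (PySem.List.pyRange 1 (PySem.Int.floordiv (cs.length : Int) 2 + 1) 1).any
          (fun i => PySem.List.slice cs (some (-i)) none == PySem.List.slice cs (some (-(2*i))) (some (-i)))
        = (PySem.List.pyRange 1 (PySem.Int.floordiv (cs.length : Int) 2 + 1) 1).any
          (fun i => decide (i ≤ PySem.List.pyGetD ((List.range cs.length).map
              (fun i => if i = 0 then (0:Int) else (zRun cs.reverse i 0 : Int))) i 0)) := by
      rw [Bool.eq_iff_iff]
      simp only [List.any_eq_true]
      constructor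
      · rintro ⟨i, hi, hp⟩; exact ⟨i, hi, by rw [← hcongr i hi]; exact hp⟩
      · rintro ⟨i, hi, hp⟩; exact ⟨i, hi, by rw [hcongr i hi]; exact hp⟩
    by_cases hc : cs[cs.length - 1] = cs[cs.length - 2]
    · -- A short-circuits to true; B's any is true at i = 1 since r[0] == r[1]
      have hcb : (cs[cs.length - 1] == cs[cs.length - 2]) = true := by simpa using hc
      rw [hcb]
      simp only [if_true]
      symm
      rw [List.any_eq_true]
      refine ⟨1, ?_, ?_⟩
      · rw [floordiv_natCast_two, PySem.List.mem_pyRange_one]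
        have : 1 ≤ cs.length / 2 := by omega
        omega
      · have h1c : (1:Int) = ((1:Nat):Int) := by norm_num
        rw [h1c, hget 1 (by omega) (by omega)]
        simp only [decide_eq_true_eq, Nat.cast_le]
        -- 1 ≤ zRun r 1 0 because r[0] == r[1]
        rw [zRun]
        have hrl : cs.reverse.length = cs.length := List.length_reverse
        rw [if_pos (by omega)]
        have hg0 : cs.reverse.getD 0 ' ' = cs[cs.length - 1] := by
          rw [List.getD_eq_getElem _ _ (by omega)]
          rw [List.getElem_reverse]
          simp only [show cs.length - 1 - 0 = cs.length - 1 from by omega]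
        have hg1 : cs.reverse.getD (1 + 0) ' ' = cs[cs.length - 2] := by
          rw [List.getD_eq_getElem _ _ (by omega)]
          rw [List.getElem_reverse]
          simp only [show cs.length - 1 - (1 + 0) = cs.length - 2 from by omega]
        rw [hg0, hg1, if_pos (by simpa using hc)]
        exact zRun_ge cs.reverse 1 1
    · have hcb : (cs[cs.length - 1] == cs[cs.length - 2]) = false := by simpa using hc
      rw [hcb]
      simp only [Bool.false_eq_true, if_false]
      exact hany
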